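-- pv_equiv track=rewrite | github.com/sixiaoyou/LeetCode-Python | source_code/SourceCode_2023/March/LeetCode1370_IncreasingDecreasingString.py | sortString
-- ===== SOURCE A (Python) =====
-- import collections
--
-- def sortString(s: str) -> str:
--
--     count, res, l = 0, "", len(s)
--     ls = list(s)
--     os = ''.join(sorted(list(set(ls))))
--     ros = os[::-1]
--
--     c = collections.Counter(s)
--
--     while len(res) < l:
--         for i in os:
--             if c.get(i) != 0:
--                 res += i
--                 c[i] -= 1
--
--         for j in ros:
--             if c.get(j) != 0:
--                 res += j
--                 c[j] -= 1
--
--     return res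
-- ===== SOURCE B (Python) =====
-- import collections
--
-- def sortString(s: str) -> str:
--     # Decorate-sort-undecorate: the j-th occurrence of a character ch belongs to
--     # round j // 2, to the ascending pass if j is even (ranked by ord ascending)
--     # and to the descending pass if j is odd (ranked by ord descending), so a
--     # single numeric key per occurrence and one global sort produce the answer.
--     count = collections.Counter(s)
--     keyed = []
--     for ch, n in count.items():
--         for j in range(n):
--             rank = ord(ch) if j % 2 == 0 else 255 - ord(ch)
--             keyed.append((j // 2 * 512 + j % 2 * 256 + rank, ch))
--     keyed.sort(key=lambda t: t[0])
--     return ''.join(ch for _, ch in keyed)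
-- ===== Notes on version B (the rewrite author's own statement) =====
-- stated objective: alternative
-- what changed: B replaces A's repeated ascending/descending sweeps over the distinct characters with a mutably decremented Counter by decorate-sort-undecorate: each occurrence j of a character gets a single numeric key encoding (round j//2, pass parity, character rank ascending or descending), and one global sort of all occurrences followed by a join produces the result with no round loop at all.
import Mathlib
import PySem

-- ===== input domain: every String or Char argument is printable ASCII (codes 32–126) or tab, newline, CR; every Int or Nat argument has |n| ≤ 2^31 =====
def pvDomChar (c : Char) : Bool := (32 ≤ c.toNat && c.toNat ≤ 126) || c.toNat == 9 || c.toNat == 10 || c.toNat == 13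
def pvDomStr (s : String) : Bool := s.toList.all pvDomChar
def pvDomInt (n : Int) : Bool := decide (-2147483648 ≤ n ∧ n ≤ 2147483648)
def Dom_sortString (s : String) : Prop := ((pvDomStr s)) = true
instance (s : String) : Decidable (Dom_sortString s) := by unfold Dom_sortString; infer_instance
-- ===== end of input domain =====

-- B replaces A's repeated ascending/descending sweeps that decrement a Counter by a
-- decorate-sort-undecorate scheme: each occurrence gets one numeric key and a single
-- global sort produces the answer (objective: alternative algorithm, similar cost).

-- ===== PORT A =====
-- body of both inner 'for' loops: 'if c.get(x) != 0: res += x; c[x] -= 1'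
-- (Counter item assignment 'c[x] -= 1' defaults a missing key to 0, hence 'modify x 0')
def sortStringStep (st : List Char × PySem.Dict Char Int) (x : Char) :
    List Char × PySem.Dict Char Int :=
  if st.2.get? x ≠ some 0 then (st.1 ++ [x], st.2.modify x 0 (· - 1)) else st

-- 'while len(res) < l: <asc pass>; <desc pass>'; fuel only makes the recursion structural
-- (the loop body is executed verbatim while the condition holds)
def sortStringLoop (l : Nat) (os ros : List Char) :
    Nat → List Char × PySem.Dict Char Int → List Char
  | 0, st => st.1
  | fuel+1, st =>
    if st.1.length < l then
      sortStringLoop l os ros fuel (ros.foldl sortStringStep (os.foldl sortStringStep st))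
    else st.1

def sortString (s : String) : String :=
  let ls := s.toList
  let os := PySem.List.sorted (PySem.Set.ofList ls) (fun x => x) false
  let ros := os.reverse
  String.ofList (sortStringLoop ls.length os ros (ls.length + 1) ([], PySem.Dict.counter ls))

-- ===== PORT B =====
-- 'j // 2 * 512 + j % 2 * 256 + rank' with 'rank = ord(ch) if j % 2 == 0 else 255 - ord(ch)'
def sortStringKey (j : Int) (ch : Char) : Int :=
  PySem.Int.floordiv j 2 * 512 + PySem.Int.mod j 2 * 256 +
    (if PySem.Int.mod j 2 = 0 then (ch.toNat : Int) else 255 - (ch.toNat : Int))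

def sortString_alt (s : String) : String :=
  let count := PySem.Dict.counter s.toList
  let keyed := count.items.foldl (fun acc p =>
    (PySem.List.pyRange 0 p.2).foldl (fun acc j => acc ++ [(sortStringKey j p.1, p.1)]) acc) []
  String.ofList ((PySem.List.sorted keyed (fun t => t.1) false).map (·.2))

-- ===== PRECONDITION & SPEC =====
def Spec_sortString (s : String) (out : String) : Prop := out = sortString_alt s
instance (s : String) (out : String) : Decidable (Spec_sortString s out) := by unfold Spec_sortString; infer_instance

-- ===== CLAIM (what is proved, stated in full; the proofs are below) =====
def Claim_equal_sortString : Prop := ∀ (s : String), Dom_sortString s → Spec_sortString s (sortString s)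

-- ===== LEMMAS AND PROOFS =====

-- canonical intermediate form: what one round r appends, and the output after k rounds
def pvFilt (ls os : List Char) (r : Nat) : List Char :=
  os.filter (fun i => decide (2*r < ls.count i)) ++
    os.reverse.filter (fun i => decide (2*r + 1 < ls.count i))

def pvRes (ls os : List Char) (k : Nat) : List Char :=
  (List.range k).flatMap (pvFilt ls os)

-- max multiplicity of a character of ls, and the number of rounds A executes
def pvM (ls : List Char) : Nat :=
  (((PySem.List.max? (PySem.Dict.counter ls).values (fun v => v)).getD 0)).toNat

def pvR (ls : List Char) : Nat := (pvM ls + 1) / 2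

lemma pv_get?_of_contains (d : PySem.Dict Char Int) (k : Char) (h : d.contains k = true) :
    d.get? k = some (d.getD k 0) := by
  cases h' : d.get? k with
  | none => rw [PySem.Dict.get?_eq_none_iff_contains] at h'; simp [h'] at h
  | some v => rw [PySem.Dict.getD_eq_get?_getD, h']; rfl

lemma pv_values_counter (ls : List Char) :
    (PySem.Dict.counter ls).values = (PySem.Set.ofList ls).map (fun k => (ls.count k : Int)) := by
  simp only [PySem.Dict.values, PySem.Dict.items_counter, List.map_map]
  rfl

lemma pv_mInt_eq (ls : List Char) :
    (PySem.List.max? (PySem.Dict.counter ls).values (fun v => v)).getD 0 = (pvM ls : Int) := by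
  unfold pvM
  cases h : PySem.List.max? (PySem.Dict.counter ls).values (fun v => v) with
  | none => simp
  | some m =>
    have hm := PySem.List.max?_mem h
    rw [pv_values_counter] at hm
    obtain ⟨k, -, hk⟩ := List.mem_map.mp hm
    simp only [Option.getD_some]
    omega

lemma pv_cnt_le_m (ls : List Char) (i : Char) (h : i ∈ ls) : ls.count i ≤ pvM ls := by
  cases hx : PySem.List.max? (PySem.Dict.counter ls).values (fun v => v) with
  | none =>
    rw [PySem.List.max?_eq_none_iff, pv_values_counter] at hx
    have : i ∈ PySem.Set.ofList ls := (PySem.Set.mem_ofList ls i).mpr h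
    simp [List.map_eq_nil_iff] at hx
    simp [hx] at this
  | some m =>
    have := PySem.List.max?_isMax hx ((ls.count i : Int))
      (by rw [pv_values_counter]; exact List.mem_map.mpr ⟨i, (PySem.Set.mem_ofList ls i).mpr h, rfl⟩)
    have h2 : ((PySem.List.max? (PySem.Dict.counter ls).values (fun v => v)).getD 0) = m := by rw [hx]; rfl
    rw [pv_mInt_eq] at h2
    omega

lemma pv_m_mem (ls : List Char) (h : 0 < pvM ls) : ∃ i ∈ ls, ls.count i = pvM ls := by
  cases hx : PySem.List.max? (PySem.Dict.counter ls).values (fun v => v) with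
  | none => unfold pvM at h; rw [hx] at h; simp at h
  | some m =>
    have hm := PySem.List.max?_mem hx
    rw [pv_values_counter] at hm
    obtain ⟨k, hk, hke⟩ := List.mem_map.mp hm
    refine ⟨k, (PySem.Set.mem_ofList ls k).mp hk, ?_⟩
    have h2 : ((PySem.List.max? (PySem.Dict.counter ls).values (fun v => v)).getD 0) = m := by rw [hx]; rfl
    rw [pv_mInt_eq] at h2
    omega

lemma pv_pass (keyset : List Char) (f : Char → Int) (u : List Char) :
    ∀ (res : List Char) (c : PySem.Dict Char Int),
    u.Nodup → (∀ i ∈ u, i ∈ keyset) →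
    (∀ j, c.contains j = decide (j ∈ keyset)) →
    (∀ i ∈ u, c.getD i 0 = f i) →
    (u.foldl sortStringStep (res, c)).1 = res ++ u.filter (fun i => decide (f i ≠ 0)) ∧
    (∀ j, (u.foldl sortStringStep (res, c)).2.contains j = decide (j ∈ keyset)) ∧
    (∀ j, (u.foldl sortStringStep (res, c)).2.getD j 0 =
      if j ∈ u ∧ f j ≠ 0 then f j - 1 else c.getD j 0) := by
  induction u with
  | nil => intro res c _ _ hcont _; simp [hcont]
  | cons a u ih =>
    intro res c hnd hsub hcont hval
    have hnda : a ∉ u := (List.nodup_cons.mp hnd).1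
    have hndu : u.Nodup := (List.nodup_cons.mp hnd).2
    have hca : c.contains a = true := by
      rw [hcont]; simp [hsub a (by simp)]
    have hga : c.getD a 0 = f a := hval a (by simp)
    have hget : c.get? a = some (f a) := by rw [pv_get?_of_contains c a hca, hga]
    by_cases hfa : f a = 0
    · -- condition false, state unchanged
      have hstep : sortStringStep (res, c) a = (res, c) := by
        simp [sortStringStep, hget, hfa]
      rw [List.foldl_cons, hstep]
      obtain ⟨h1, h2, h3⟩ := ih res c hndu (fun i hi => hsub i (by simp [hi]))
        hcont (fun i hi => hval i (by simp [hi]))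
      refine ⟨?_, h2, ?_⟩
      · rw [h1]; simp [hfa]
      · intro j
        rw [h3 j]
        by_cases hju : j ∈ u
        · simp [hju]
        · by_cases hja : j = a
          · subst hja; simp [hju, hfa]
          · simp [hju, hja]
    · -- condition true: append a, decrement
      have hstep : sortStringStep (res, c) a = (res ++ [a], c.modify a 0 (· - 1)) := by
        simp [sortStringStep, hget, hfa]
      rw [List.foldl_cons, hstep]
      have hcont' : ∀ j, (c.modify a 0 (· - 1)).contains j = decide (j ∈ keyset) := by
        intro j
        rw [PySem.Dict.contains_modify]
        by_cases hja : j = a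
        · simp [hja, hsub a (by simp)]
        · simp [hja, hcont j]
      have hval' : ∀ i ∈ u, (c.modify a 0 (· - 1)).getD i 0 = f i := by
        intro i hi
        rw [PySem.Dict.getD_modify]
        have : i ≠ a := fun h => hnda (h ▸ hi)
        simp [this, hval i (by simp [hi])]
      obtain ⟨h1, h2, h3⟩ := ih (res ++ [a]) (c.modify a 0 (· - 1)) hndu
        (fun i hi => hsub i (by simp [hi])) hcont' hval'
      refine ⟨?_, h2, ?_⟩
      · rw [h1]; simp [hfa]
      · intro j
        rw [h3 j, PySem.Dict.getD_modify]
        by_cases hju : j ∈ u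
        · have hja : j ≠ a := fun h => hnda (h ▸ hju)
          simp [hju, hja]
        · by_cases hja : j = a
          · simp [hja, hfa, hga]
          · simp [hju, hja]

lemma pv_round (ls os : List Char) (k : Nat) (res : List Char) (c : PySem.Dict Char Int)
    (hnd : os.Nodup)
    (hcont : ∀ j, c.contains j = decide (j ∈ os))
    (hval : ∀ i ∈ os, c.getD i 0 = max ((ls.count i : Int) - 2*(k:Int)) 0) :
    (os.reverse.foldl sortStringStep (os.foldl sortStringStep (res, c))).1
      = res ++ pvFilt ls os k ∧
    (∀ j, (os.reverse.foldl sortStringStep (os.foldl sortStringStep (res, c))).2.contains j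
      = decide (j ∈ os)) ∧
    (∀ i ∈ os, (os.reverse.foldl sortStringStep (os.foldl sortStringStep (res, c))).2.getD i 0
      = max ((ls.count i : Int) - 2*((k:Int)+1)) 0) := by
  obtain ⟨h1, h2, h3⟩ := pv_pass os (fun i => max ((ls.count i : Int) - 2*(k:Int)) 0) os res c
    hnd (fun _ h => h) hcont hval
  set st1 := os.foldl sortStringStep (res, c) with hst1
  have hpair : st1 = (st1.1, st1.2) := rfl
  rw [hpair] at *
  have hval1 : ∀ i ∈ os.reverse, st1.2.getD i 0
      = max ((ls.count i : Int) - (2*(k:Int)+1)) 0 := by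
    intro i hi
    have hio : i ∈ os := List.mem_reverse.mp hi
    rw [h3 i]
    split_ifs with h
    · have h2' := h.2
      omega
    · have h2' : max ((ls.count i : Int) - 2*(k:Int)) 0 = 0 := by
        by_contra hc; exact h ⟨hio, hc⟩
      rw [hval i hio]
      omega
  obtain ⟨g1, g2, g3⟩ := pv_pass os (fun i => max ((ls.count i : Int) - (2*(k:Int)+1)) 0)
    os.reverse st1.1 st1.2 (List.nodup_reverse.mpr hnd) (fun i hi => List.mem_reverse.mp hi) h2 hval1
  refine ⟨?_, g2, ?_⟩
  · rw [g1, h1, List.append_assoc]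
    unfold pvFilt
    congr 2
    · apply List.filter_congr
      intro i _
      apply decide_eq_decide.mpr
      omega
    · apply List.filter_congr
      intro i _
      apply decide_eq_decide.mpr
      omega
  · intro i hi
    have hir : i ∈ os.reverse := List.mem_reverse.mpr hi
    rw [g3 i]
    split_ifs with h
    · have h2' := h.2
      omega
    · have h2' : max ((ls.count i : Int) - (2*(k:Int)+1)) 0 = 0 := by
        by_contra hc; exact h ⟨hir, hc⟩
      rw [hval1 i hir]
      omega

lemma pv_pvRes_succ (ls os : List Char) (k : Nat) :
    pvRes ls os (k+1) = pvRes ls os k ++ pvFilt ls os k := by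
  unfold pvRes
  rw [List.range_succ, List.flatMap_append]
  simp

lemma pv_len_step (ls : List Char) (u : List Char) (k : Nat) :
    (u.map (fun i => min (ls.count i) (2*k))).sum
      + u.countP (fun i => decide (2*k < ls.count i))
      + u.countP (fun i => decide (2*k + 1 < ls.count i))
      = (u.map (fun i => min (ls.count i) (2*(k+1)))).sum := by
  induction u with
  | nil => simp
  | cons a u ih =>
    simp only [List.map_cons, List.sum_cons, List.countP_cons]
    by_cases h1 : 2*k < ls.count a <;> by_cases h2 : 2*k+1 < ls.count a <;>
      simp [h1, h2] <;> omega

lemma pv_len_pvRes (ls os : List Char) (k : Nat) :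
    (pvRes ls os k).length = (os.map (fun i => min (ls.count i) (2*k))).sum := by
  induction k with
  | zero => simp [pvRes]
  | succ k ih =>
    rw [pv_pvRes_succ, List.length_append, ih]
    unfold pvFilt
    rw [List.length_append, ← List.countP_eq_length_filter, ← List.countP_eq_length_filter, List.countP_reverse]
    rw [← Nat.add_assoc]; exact pv_len_step ls os k

lemma pv_len_ls (ls os : List Char) (hnd : os.Nodup) (hmem : ∀ i, i ∈ os ↔ i ∈ ls) :
    ls.length = (os.map (fun i => ls.count i)).sum := by
  have hperm : os.Perm ls.dedup := by
    rw [List.perm_ext_iff_of_nodup hnd (List.nodup_dedup ls)]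
    intro i
    rw [hmem i, List.mem_dedup]
  rw [← List.sum_map_count_dedup_eq_length ls]
  exact (List.Perm.sum_eq (hperm.map (fun i => ls.count i))).symm

lemma pv_pvRes_stable (ls os : List Char) (hmem : ∀ i, i ∈ os ↔ i ∈ ls) (k : Nat)
    (h : pvR ls ≤ k) : pvRes ls os k = pvRes ls os (pvR ls) := by
  induction k with
  | zero => rw [Nat.le_zero.mp h]
  | succ k ih =>
    rcases Nat.lt_or_ge k (pvR ls) with hk | hk
    · rw [show pvR ls = k+1 by omega]
    · rw [pv_pvRes_succ, ih hk]
      have hfe : pvFilt ls os k = [] := by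
        unfold pvFilt
        rw [List.filter_eq_nil_iff.mpr ?_, List.filter_eq_nil_iff.mpr ?_]
        · rfl
        · intro i hi
          have := pv_cnt_le_m ls i ((hmem i).mp (List.mem_reverse.mp hi))
          simp only [decide_eq_true_eq]
          unfold pvR at hk
          omega
        · intro i hi
          have := pv_cnt_le_m ls i ((hmem i).mp hi)
          simp only [decide_eq_true_eq]
          unfold pvR at hk
          omega
      rw [hfe, List.append_nil]

lemma pv_loop (ls os : List Char) (hnd : os.Nodup) (hmem : ∀ i, i ∈ os ↔ i ∈ ls) :
    ∀ (fuel k : Nat) (c : PySem.Dict Char Int),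
    pvR ls ≤ k + fuel →
    (∀ j, c.contains j = decide (j ∈ os)) →
    (∀ i ∈ os, c.getD i 0 = max ((ls.count i : Int) - 2*(k:Int)) 0) →
    sortStringLoop ls.length os os.reverse fuel (pvRes ls os k, c) = pvRes ls os (pvR ls) := by
  intro fuel
  induction fuel with
  | zero =>
    intro k c h _ _
    have hk : pvR ls ≤ k := by omega
    simpa [sortStringLoop] using pv_pvRes_stable ls os hmem k hk
  | succ fuel ih =>
    intro k c h hcont hval
    rcases Nat.lt_or_ge k (pvR ls) with hk | hk
    · -- the while condition holds: one more round is executed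
      have hlen : (pvRes ls os k).length < ls.length := by
        rw [pv_len_pvRes, pv_len_ls ls os hnd hmem]
        have hm : 0 < pvM ls := by unfold pvR at hk; omega
        obtain ⟨i₀, hi₀, hc₀⟩ := pv_m_mem ls hm
        refine List.sum_lt_sum _ _ (fun i _ => Nat.min_le_left _ _) ⟨i₀, (hmem i₀).mpr hi₀, ?_⟩
        unfold pvR at hk
        omega
      simp only [sortStringLoop, hlen, if_pos]
      obtain ⟨r1, r2, r3⟩ := pv_round ls os k (pvRes ls os k) c hnd hcont hval
      set st := os.reverse.foldl sortStringStep (os.foldl sortStringStep (pvRes ls os k, c)) with hst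
      have hst1 : st = (pvRes ls os (k+1), st.2) := by
        rw [Prod.ext_iff]
        exact ⟨by rw [r1, pv_pvRes_succ], rfl⟩
      rw [hst1]
      refine ih (k+1) st.2 (by omega) r2 ?_
      intro i hi
      have := r3 i hi
      push_cast
      push_cast at this
      exact this
    · -- the while condition fails: the loop stops
      have hlen : ¬ ((pvRes ls os k).length < ls.length) := by
        rw [pv_len_pvRes, pv_len_ls ls os hnd hmem]
        have hc : ∀ i ∈ os, min (ls.count i) (2*k) = ls.count i := by
          intro i hi
          have := pv_cnt_le_m ls i ((hmem i).mp hi)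
          unfold pvR at hk
          omega
        rw [List.map_congr_left hc]
        omega
      simp only [sortStringLoop, hlen, if_neg, not_false_iff]
      exact pv_pvRes_stable ls os hmem k hk

lemma pv_A_eq (s : String) :
    sortString s = String.ofList (pvRes s.toList
      (PySem.List.sorted (PySem.Set.ofList s.toList) (fun x => x) false) (pvR s.toList)) := by
  simp only [sortString]
  set ls := s.toList with hls
  set os := PySem.List.sorted (PySem.Set.ofList ls) (fun x => x) false with hos
  have hperm := PySem.List.sorted_perm (PySem.Set.ofList ls) (fun x => x) false
  have hnd : os.Nodup := hperm.nodup_iff.mpr (PySem.Set.nodup_ofList ls)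
  have hmem : ∀ i, i ∈ os ↔ i ∈ ls := fun i => hperm.mem_iff.trans (PySem.Set.mem_ofList ls i)
  have hml : pvM ls ≤ ls.length := by
    rcases Nat.eq_zero_or_pos (pvM ls) with h | h
    · omega
    · obtain ⟨i₀, hi₀, hc⟩ := pv_m_mem ls h
      have := List.count_le_length (a := i₀) (l := ls)
      omega
  have h0 : ([] : List Char) = pvRes ls os 0 := rfl
  rw [h0]
  congr 1
  refine pv_loop ls os hnd hmem (ls.length+1) 0 (PySem.Dict.counter ls)
    (by unfold pvR; omega) ?_ ?_
  · intro j
    rw [PySem.Dict.contains_counter]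
    simp [hmem j]
  · intro i hi
    rw [PySem.Dict.getD_counter]
    push_cast
    omega

-- ===== B side: decorate-sort-undecorate =====

-- the key of occurrence number j (a Nat) of character c, as B computes it
def pvKey (j : Nat) (c : Char) : Int :=
  if j % 2 = 0 then ((j / 2 * 512 : Nat) : Int) + (c.toNat : Int)
  else ((j / 2 * 512 + 256 : Nat) : Int) + (255 - (c.toNat : Int))

lemma pv_key_eq (j : Nat) (c : Char) : sortStringKey (j : Int) c = pvKey j c := by
  have h1 : PySem.Int.floordiv (j : Int) 2 = ((j / 2 : Nat) : Int) :=
    PySem.Int.floordiv_natCast j 2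
  have h2 : PySem.Int.mod (j : Int) 2 = ((j % 2 : Nat) : Int) :=
    PySem.Int.mod_natCast j 2
  unfold sortStringKey pvKey
  rw [h1, h2]
  by_cases h : j % 2 = 0
  · simp [h]
  · have h' : j % 2 = 1 := by omega
    simp [h']

-- keyed list B builds, in closed form
def pvKeyed (ls : List Char) : List (Int × Char) :=
  (PySem.Set.ofList ls).flatMap (fun c => (List.range (ls.count c)).map (fun j => (pvKey j c, c)))

lemma pv_keyed_eq (ls : List Char) :
    (PySem.Dict.counter ls).items.foldl (fun acc p =>
      (PySem.List.pyRange 0 p.2).foldl (fun acc j => acc ++ [(sortStringKey j p.1, p.1)]) acc) []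
    = pvKeyed ls := by
  have hin : ∀ (acc : List (Int × Char)) (p : Char × Int),
      (PySem.List.pyRange 0 p.2).foldl (fun acc j => acc ++ [(sortStringKey j p.1, p.1)]) acc
      = acc ++ (PySem.List.pyRange 0 p.2).map (fun j => (sortStringKey j p.1, p.1)) := by
    intro acc p
    exact PySem.List.foldl_append_singleton_eq_map _ _ acc
  rw [show (fun (acc : List (Int × Char)) (p : Char × Int) =>
      (PySem.List.pyRange 0 p.2).foldl (fun acc j => acc ++ [(sortStringKey j p.1, p.1)]) acc)
      = fun acc p => acc ++ (PySem.List.pyRange 0 p.2).map (fun j => (sortStringKey j p.1, p.1))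
      from funext fun acc => funext fun p => hin acc p]
  rw [PySem.List.foldl_append_eq_flatMap, PySem.Dict.items_counter, List.flatMap_map]
  unfold pvKeyed
  rw [List.nil_append]
  apply List.flatMap_congr
  intro c _
  rw [PySem.List.pyRange_zero_natCast, List.map_map]
  apply List.map_congr_left
  intro j _
  simp [pv_key_eq]

-- the sorted keyed list, in closed form: blocks of rounds
def pvBlock (ls os : List Char) (r : Nat) : List (Int × Char) :=
  (os.filter (fun i => decide (2*r < ls.count i))).map (fun c => (pvKey (2*r) c, c)) ++
    (os.reverse.filter (fun i => decide (2*r + 1 < ls.count i))).map (fun c => (pvKey (2*r+1) c, c))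

def pvT (ls os : List Char) (k : Nat) : List (Int × Char) :=
  (List.range k).flatMap (pvBlock ls os)

lemma pv_T_map_snd (ls os : List Char) (k : Nat) :
    (pvT ls os k).map (·.2) = pvRes ls os k := by
  unfold pvT pvRes pvBlock pvFilt
  rw [List.map_flatMap]
  apply List.flatMap_congr
  intro r _
  simp [List.map_map, Function.comp_def]

lemma pv_char_lt {c d : Char} (h : c < d) : c.toNat < d.toNat := Nat.lt_of_succ_le h

-- key bounds (chars with code ≤ 255)
lemma pv_key_bounds (j : Nat) (c : Char) (hdom : c.toNat ≤ 255) :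
    ((j / 2 * 512 : Nat) : Int) ≤ pvKey j c ∧ pvKey j c < ((j / 2 * 512 + 512 : Nat) : Int) := by
  unfold pvKey
  by_cases h : j % 2 = 0
  · simp [h]
    omega
  · simp [h]
    omega

lemma pv_key_inj (j j' : Nat) (c : Char) (h : pvKey j c = pvKey j' c) : j = j' := by
  unfold pvKey at h
  by_cases h1 : j % 2 = 0 <;> by_cases h2 : j' % 2 = 0 <;> simp [h1, h2] at h <;> omega

lemma pv_keyed_nodup (ls : List Char) : (pvKeyed ls).Nodup := by
  unfold pvKeyed
  rw [List.nodup_flatMap]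
  constructor
  · intro c hc
    refine List.Nodup.map ?_ (List.nodup_range)
    intro a b hab
    have := congrArg Prod.fst hab
    exact pv_key_inj a b c this
  · refine (PySem.Set.nodup_ofList ls).imp ?_
    intro a b hne
    rw [Function.onFun, List.disjoint_left]
    intro p hpa hpb
    obtain ⟨ja, -, rfl⟩ := List.mem_map.mp hpa
    obtain ⟨jb, -, hb⟩ := List.mem_map.mp hpb
    exact hne (congrArg Prod.snd hb).symm

lemma pv_mem_keyed (ls : List Char) (p : Int × Char) :
    p ∈ pvKeyed ls ↔ ∃ c, c ∈ ls ∧ ∃ j, j < ls.count c ∧ p = (pvKey j c, c) := by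
  unfold pvKeyed
  simp [List.mem_flatMap, PySem.Set.mem_ofList, List.mem_map, List.mem_range, eq_comm]

lemma pv_mem_T (ls os : List Char) (hmem : ∀ i, i ∈ os ↔ i ∈ ls) (p : Int × Char) :
    p ∈ pvT ls os (pvR ls) ↔ ∃ c, c ∈ ls ∧ ∃ j, j < ls.count c ∧ p = (pvKey j c, c) := by
  unfold pvT pvBlock
  simp only [List.mem_flatMap, List.mem_range, List.mem_append, List.mem_map, List.mem_filter,
    List.mem_reverse, decide_eq_true_eq]
  constructor
  · rintro ⟨r, hr, ⟨c, ⟨hc, hcnt⟩, rfl⟩ | ⟨c, ⟨hc, hcnt⟩, rfl⟩⟩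
    · exact ⟨c, (hmem c).mp hc, 2*r, hcnt, rfl⟩
    · exact ⟨c, (hmem c).mp hc, 2*r+1, hcnt, rfl⟩
  · rintro ⟨c, hc, j, hj, rfl⟩
    have hcm := pv_cnt_le_m ls c hc
    refine ⟨j / 2, by unfold pvR; omega, ?_⟩
    by_cases hpar : j % 2 = 0
    · left
      exact ⟨c, ⟨(hmem c).mpr hc, by omega⟩, by rw [show 2 * (j/2) = j by omega]⟩
    · right
      exact ⟨c, ⟨(hmem c).mpr hc, by omega⟩, by rw [show 2 * (j/2) + 1 = j by omega]⟩

lemma pv_block_key_bounds (ls os : List Char) (hdom : ∀ c ∈ os, c.toNat ≤ 255) (r : Nat)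
    (p : Int × Char) (hp : p ∈ pvBlock ls os r) :
    ((r * 512 : Nat) : Int) ≤ p.1 ∧ p.1 < ((r * 512 + 512 : Nat) : Int) := by
  unfold pvBlock at hp
  rcases List.mem_append.mp hp with h | h
  · obtain ⟨c, hc, rfl⟩ := List.mem_map.mp h
    have := pv_key_bounds (2*r) c (hdom c (List.mem_filter.mp hc).1)
    rw [show (2*r)/2 = r by omega] at this
    exact this
  · obtain ⟨c, hc, rfl⟩ := List.mem_map.mp h
    have := pv_key_bounds (2*r+1) c (hdom c (List.mem_reverse.mp (List.mem_filter.mp hc).1))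
    rw [show (2*r+1)/2 = r by omega] at this
    exact this

lemma pv_key_even (r : Nat) (c : Char) :
    pvKey (2*r) c = ((r * 512 : Nat) : Int) + (c.toNat : Int) := by
  unfold pvKey
  rw [if_pos (by omega), show 2*r/2 = r from by omega]

lemma pv_key_odd (r : Nat) (c : Char) :
    pvKey (2*r+1) c = ((r * 512 + 256 : Nat) : Int) + (255 - (c.toNat : Int)) := by
  unfold pvKey
  rw [if_neg (by omega), show (2*r+1)/2 = r from by omega]

lemma pv_block_pairwise (ls os : List Char) (hos : os.Pairwise (· < ·))
    (hdom : ∀ c ∈ os, c.toNat ≤ 255) (r : Nat) :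
    (pvBlock ls os r).Pairwise (fun a b => a.1 < b.1) := by
  unfold pvBlock
  rw [List.pairwise_append]
  refine ⟨?_, ?_, ?_⟩
  · rw [List.pairwise_map]
    refine (hos.filter _).imp ?_
    intro a b hab
    rw [pv_key_even, pv_key_even]
    have := pv_char_lt hab
    omega
  · rw [List.pairwise_map]
    have : (os.reverse).Pairwise (fun a b => b < a) := by
      rw [List.pairwise_reverse]
      exact hos
    refine (this.filter _).imp ?_
    intro a b hab
    rw [pv_key_odd, pv_key_odd]
    have := pv_char_lt hab
    omega
  · intro a ha b hb
    obtain ⟨c, hc, rfl⟩ := List.mem_map.mp ha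
    obtain ⟨d, hd, rfl⟩ := List.mem_map.mp hb
    have hcd : c.toNat ≤ 255 := hdom c (List.mem_filter.mp hc).1
    have hdd : d.toNat ≤ 255 := hdom d (List.mem_reverse.mp (List.mem_filter.mp hd).1)
    rw [pv_key_even, pv_key_odd]
    push_cast
    omega

lemma pv_T_pairwise (ls os : List Char) (hos : os.Pairwise (· < ·))
    (hdom : ∀ c ∈ os, c.toNat ≤ 255) (k : Nat) :
    (pvT ls os k).Pairwise (fun a b => a.1 < b.1) := by
  induction k with
  | zero => simp [pvT]
  | succ k ih =>
    have hsucc : pvT ls os (k+1) = pvT ls os k ++ pvBlock ls os k := by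
      unfold pvT
      rw [List.range_succ, List.flatMap_append]
      simp
    rw [hsucc, List.pairwise_append]
    refine ⟨ih, pv_block_pairwise ls os hos hdom k, ?_⟩
    intro a ha b hb
    obtain ⟨r, hr, har⟩ := List.mem_flatMap.mp ha
    have h1 := pv_block_key_bounds ls os hdom r a har
    have h2 := pv_block_key_bounds ls os hdom k b hb
    have hrk : r < k := List.mem_range.mp hr
    have : ((r * 512 + 512 : Nat) : Int) ≤ ((k * 512 : Nat) : Int) := by
      push_cast
      have : r + 1 ≤ k := hrk
      nlinarith
    omega

lemma pv_B_eq (s : String) (hdom : ∀ c ∈ s.toList, c.toNat ≤ 255) :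
    sortString_alt s = String.ofList (pvRes s.toList
      (PySem.List.sorted (PySem.Set.ofList s.toList) (fun x => x) false) (pvR s.toList)) := by
  simp only [sortString_alt]
  set ls := s.toList with hls
  set os := PySem.List.sorted (PySem.Set.ofList ls) (fun x => x) false with hos
  have hperm := PySem.List.sorted_perm (PySem.Set.ofList ls) (fun x => x) false
  have hnd : os.Nodup := hperm.nodup_iff.mpr (PySem.Set.nodup_ofList ls)
  have hmem : ∀ i, i ∈ os ↔ i ∈ ls := fun i => hperm.mem_iff.trans (PySem.Set.mem_ofList ls i)
  have hosp : os.Pairwise (· < ·) := PySem.List.sorted_ofList_pairwise_lt ls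
  have hdomos : ∀ c ∈ os, c.toNat ≤ 255 := fun c hc => hdom c ((hmem c).mp hc)
  rw [pv_keyed_eq]
  have hTnd : (pvT ls os (pvR ls)).Nodup :=
    (pv_T_pairwise ls os hosp hdomos (pvR ls)).imp (by
      intro a b h heq
      rw [heq] at h
      exact lt_irrefl _ h)
  have hp : (pvT ls os (pvR ls)).Perm (pvKeyed ls) := by
    rw [List.perm_ext_iff_of_nodup hTnd (pv_keyed_nodup ls)]
    intro p
    rw [pv_mem_T ls os hmem p, pv_mem_keyed ls p]
  rw [PySem.List.sorted_eq_of_perm_of_pairwise_lt _ _ _ hp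
    (pv_T_pairwise ls os hosp hdomos (pvR ls))]
  rw [pv_T_map_snd]

-- ===== VERDICT (by name: the statement is the Claim_ definition above) =====
theorem sortString_spec : Claim_equal_sortString := by
  intro s hd
  unfold Spec_sortString
  have hdom : ∀ c ∈ s.toList, c.toNat ≤ 255 := by
    unfold Dom_sortString pvDomStr at hd
    rw [List.all_eq_true] at hd
    intro c hc
    have := hd c hc
    unfold pvDomChar at this
    simp only [Bool.or_eq_true, Bool.and_eq_true, decide_eq_true_eq, beq_iff_eq] at this
    omega
  rw [pv_A_eq, pv_B_eq s hdom]
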